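-- pv_equiv track=rewrite | github.com/davidtkeane/rangerplex-ai | docs/RangerPlexBrowser/.rangeros_vault/consciousness_stream_capture.py | infer_current_project
-- ===== SOURCE A (Python) =====
-- def infer_current_project(apps):
--     """Determine what David is primarily working on"""
--
--     # Analyze application constellation to determine primary project
--     if any('rangeros' in str(app).lower() for app in apps.keys()):
--         return "RangerOS_Development"
--     elif any('research' in str(app).lower() for app in apps.keys()):
--         return "Mount_Ararat_Research"
--     elif any('education' in str(app).lower() for app in apps.keys()):
--         return "Educational_Platform_Development"
--     else:
--         return "General_Exploration"
-- ===== SOURCE B (Python) =====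
-- def infer_current_project(apps):
--     """Determine what David is primarily working on"""
--     has_rangeros = has_research = has_education = False
--     for app in apps.keys():
--         s = str(app).lower()
--         if 'rangeros' in s:
--             has_rangeros = True
--         if 'research' in s:
--             has_research = True
--         if 'education' in s:
--             has_education = True
--     if has_rangeros:
--         return "RangerOS_Development"
--     if has_research:
--         return "Mount_Ararat_Research"
--     if has_education:
--         return "Educational_Platform_Development"
--     return "General_Exploration"
-- ===== Notes on version B (the rewrite author's own statement) =====
-- stated objective: alternative
-- what changed: Single pass over the keys accumulating three presence flags (each key lowercased once), then one priority chain, instead of three separate any(...) generator scans that each re-lowercase every key.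
import Mathlib
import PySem

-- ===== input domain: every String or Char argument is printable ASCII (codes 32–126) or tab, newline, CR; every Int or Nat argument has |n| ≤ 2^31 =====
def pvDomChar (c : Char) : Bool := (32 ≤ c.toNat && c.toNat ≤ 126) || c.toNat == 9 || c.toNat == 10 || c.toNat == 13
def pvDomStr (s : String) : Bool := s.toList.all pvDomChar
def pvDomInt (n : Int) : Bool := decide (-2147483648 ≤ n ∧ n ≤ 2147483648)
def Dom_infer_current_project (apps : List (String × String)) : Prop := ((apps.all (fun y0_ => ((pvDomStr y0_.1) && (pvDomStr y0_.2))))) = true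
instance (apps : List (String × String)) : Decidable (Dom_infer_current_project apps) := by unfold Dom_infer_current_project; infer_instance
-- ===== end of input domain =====

-- B makes one pass over the keys accumulating three presence flags (lowercasing each key once) instead of A's three separate any(...) scans; objective: alternative decomposition (one traversal, each key lowercased once).

-- ===== PORT A =====
-- A: three successive any(...) scans over the dict's keys, each lowercasing every key.
def infer_current_project (apps : List (String × String)) : String :=
  if apps.any (fun app => PySem.Str.isIn "rangeros" (PySem.Str.lower app.1)) then
    "RangerOS_Development"
  else if apps.any (fun app => PySem.Str.isIn "research" (PySem.Str.lower app.1)) then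
    "Mount_Ararat_Research"
  else if apps.any (fun app => PySem.Str.isIn "education" (PySem.Str.lower app.1)) then
    "Educational_Platform_Development"
  else
    "General_Exploration"

-- ===== PORT B =====
-- B: one fold over the keys maintaining (has_rangeros, has_research, has_education).
def infer_current_project_alt (apps : List (String × String)) : String :=
  let flags : Bool × Bool × Bool :=
    apps.foldl
      (fun acc app =>
        let s := PySem.Str.lower app.1
        ((acc.1 || PySem.Str.isIn "rangeros" s),
         (acc.2.1 || PySem.Str.isIn "research" s),
         (acc.2.2 || PySem.Str.isIn "education" s)))
      (false, false, false)
  if flags.1 then "RangerOS_Development"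
  else if flags.2.1 then "Mount_Ararat_Research"
  else if flags.2.2 then "Educational_Platform_Development"
  else "General_Exploration"

-- ===== PRECONDITION & SPEC =====
def Spec_infer_current_project (apps : List (String × String)) (out : String) : Prop := out = infer_current_project_alt apps
instance (apps : List (String × String)) (out : String) : Decidable (Spec_infer_current_project apps out) := by unfold Spec_infer_current_project; infer_instance

-- ===== CLAIM (what is proved, stated in full; the proofs are below) =====
def Claim_equal_infer_current_project : Prop := ∀ (apps : List (String × String)), Dom_infer_current_project apps → Spec_infer_current_project apps (infer_current_project apps)

-- ===== LEMMAS AND PROOFS =====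

-- The fold in B computes exactly the three `any` tests of A (disjoined with the accumulator).
theorem pv_fold_flags (apps : List (String × String)) (a b c : Bool) :
    apps.foldl
      (fun acc app =>
        let s := PySem.Str.lower app.1
        ((acc.1 || PySem.Str.isIn "rangeros" s),
         (acc.2.1 || PySem.Str.isIn "research" s),
         (acc.2.2 || PySem.Str.isIn "education" s)))
      (a, b, c)
    = ((a || apps.any (fun app => PySem.Str.isIn "rangeros" (PySem.Str.lower app.1))),
       (b || apps.any (fun app => PySem.Str.isIn "research" (PySem.Str.lower app.1))),
       (c || apps.any (fun app => PySem.Str.isIn "education" (PySem.Str.lower app.1)))) := by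
  induction apps generalizing a b c with
  | nil => simp
  | cons hd tl ih =>
    simp only [List.foldl_cons, List.any_cons, ih]
    simp [Bool.or_assoc]

-- ===== VERDICT (by name: the statement is the Claim_ definition above) =====
theorem infer_current_project_spec : Claim_equal_infer_current_project := by
  intro apps _
  unfold Spec_infer_current_project infer_current_project infer_current_project_alt
  rw [pv_fold_flags]
  simp only [Bool.false_or]
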